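-- pv_equiv track=rewrite | github.com/anujdhawan/gcp-provisioning | modules/check_cloud_identity.py | create_email_list
-- ===== SOURCE A (Python) =====
-- def create_email_list(emails):
--     email_list = []
--     username = ''
--
--     for character in emails:
--         if character.isalnum() or character == '@' or character == '.' or character == '-':
--             username = username + character
--         elif character == ',' or character == ']':
--             email_list.append(username)
--             username = ''
--     return email_list
-- ===== SOURCE B (Python) =====
-- def create_email_list(emails):
--     # Same fields as A: keep the chars A accumulates plus the two delimiters,
--     # remap ']' to ',', split once, and drop the never-flushed trailing piece.
--     cleaned = ''.join(',' if c == ']' else c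
--                       for c in emails if c.isalnum() or c in '@.-,]')
--     return cleaned.split(',')[:-1]
-- ===== Notes on version B (the rewrite author's own statement) =====
-- stated objective: simpler
-- what changed: Replaces A's stateful character loop (accumulator + flush-on-delimiter) with a stateless pipeline: filter/remap the characters into one cleaned string, split it once on ',', and drop the never-flushed trailing field.
import Mathlib
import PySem

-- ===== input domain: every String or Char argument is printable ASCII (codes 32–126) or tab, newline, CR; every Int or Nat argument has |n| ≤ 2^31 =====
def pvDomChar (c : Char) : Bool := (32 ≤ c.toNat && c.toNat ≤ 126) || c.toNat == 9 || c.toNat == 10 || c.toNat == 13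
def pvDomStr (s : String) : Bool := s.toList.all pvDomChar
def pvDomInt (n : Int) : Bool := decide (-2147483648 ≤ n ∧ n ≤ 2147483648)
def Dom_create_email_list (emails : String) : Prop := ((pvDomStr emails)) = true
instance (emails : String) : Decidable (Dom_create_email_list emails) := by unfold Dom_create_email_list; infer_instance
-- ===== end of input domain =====

-- B rebuilds the same fields by filtering the kept characters (with the two delimiters,
-- ']' remapped to ','), splitting once on ',' and dropping the unflushed tail — simpler decomposition.


-- ===== PORT A =====
-- character.isalnum() or character == '@' or '.' or '-'
def pvAKeep (c : Char) : Bool :=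
  PySem.Chars.isalnum c || c = '@' || c = '.' || c = '-'

-- the for-loop of A: state (email_list, username); username kept as List Char
def pvALoop : List Char → List (List Char) → List Char → List (List Char)
  | [], acc, _ => acc
  | c :: cs, acc, u =>
    if pvAKeep c then pvALoop cs acc (u ++ [c])
    else if c = ',' || c = ']' then pvALoop cs (acc ++ [u]) []
    else pvALoop cs acc u

def create_email_list (emails : String) : List String :=
  (pvALoop emails.toList [] []).map (fun cs => String.ofList cs)

-- ===== PORT B =====
-- c.isalnum() or c in '@.-,]'
def pvBKeep (c : Char) : Bool :=
  PySem.Chars.isalnum c || c = '@' || c = '.' || c = '-' || c = ',' || c = ']'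

def create_email_list_alt (emails : String) : List String :=
  -- cleaned = ''.join(',' if c == ']' else c for c in emails if pvBKeep c); cleaned.split(',')[:-1]
  (PySem.List.slice
    (PySem.Chars.splitOn
      ((emails.toList.filter pvBKeep).map (fun c => if c = ']' then ',' else c)) [','])
    none (some (-1))).map (fun cs => String.ofList cs)

-- ===== PRECONDITION & SPEC =====
def Spec_create_email_list (emails : String) (out : List String) : Prop := out = create_email_list_alt emails
instance (emails : String) (out : List String) : Decidable (Spec_create_email_list emails out) := by unfold Spec_create_email_list; infer_instance

-- ===== CLAIM (what is proved, stated in full; the proofs are below) =====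
def Claim_equal_create_email_list : Prop := ∀ (emails : String), Dom_create_email_list emails → Spec_create_email_list emails (create_email_list emails)

-- ===== LEMMAS AND PROOFS =====

-- split-on-comma with an explicit current-field accumulator (proof model of str.split(','))
def pvMM : List Char → List Char → List (List Char)
  | [], cur => [cur]
  | c :: rest, cur => if c = ',' then cur :: pvMM rest [] else pvMM rest (cur ++ [c])

lemma pvMM_ne_nil (l cur : List Char) : pvMM l cur ≠ [] := by
  induction l generalizing cur with
  | nil => simp [pvMM]
  | cons c rest ih => by_cases h : c = ',' <;> simp [pvMM, h, ih]

lemma pv_go_eq (fuel : Nat) (l cur : List Char) (acc : List (List Char))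
    (h : l.length < fuel) :
    PySem.Chars.splitOn.go [','] fuel l cur acc = acc.reverse ++ pvMM l cur.reverse := by
  induction fuel generalizing l cur acc with
  | zero => omega
  | succ n ih =>
    cases l with
    | nil => simp [PySem.Chars.splitOn.go, pvMM]
    | cons c rest =>
      rw [PySem.Chars.splitOn.go.eq_def]
      by_cases hc : c = ','
      · subst hc
        simp only [List.isPrefixOf, BEq.rfl, Bool.true_and, if_pos, List.length_cons,
          List.drop_succ_cons, List.length_nil, List.drop_zero]
        rw [ih rest [] _ (by simpa using Nat.lt_of_succ_lt_succ h)]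
        simp [pvMM]
      · have hpre : ([','].isPrefixOf (c :: rest)) = false := by
          simp [List.isPrefixOf]
          exact fun hh => (hc hh.symm).elim
        simp only [hpre, Bool.false_eq_true, if_false]
        rw [ih rest (c :: cur) acc (by simpa using Nat.lt_of_succ_lt_succ h)]
        simp [pvMM, hc]

lemma pv_splitOn_eq (l : List Char) : PySem.Chars.splitOn l [','] = pvMM l [] := by
  unfold PySem.Chars.splitOn
  rw [pv_go_eq (l.length + 1) l [] [] (by omega)]
  simp

lemma pv_slice_neg_one {α : Type} (xs : List α) :
    PySem.List.slice xs none (some (-1)) = xs.dropLast := by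
  simp only [PySem.List.slice, PySem.List.clampIdx, Int.reduceNeg, Int.neg_neg_iff_pos,
    zero_lt_one, ↓reduceIte, add_neg_lt_iff_lt_add, zero_add, Nat.cast_lt_one,
    List.length_eq_zero_iff, tsub_zero, List.drop_zero]
  by_cases h : xs = []
  · simp [h]
  · have hlen : ((xs.length : Int) + -1).toNat = xs.length - 1 := by
      have := List.length_pos_of_ne_nil h
      omega
    simp [h, hlen, List.dropLast_eq_take]

-- the cleaned character stream of B
def pvClean (cs : List Char) : List Char :=
  (cs.filter pvBKeep).map (fun c => if c = ']' then ',' else c)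

lemma pvAKeep_not_delim {c : Char} (h : pvAKeep c = true) : c ≠ ',' ∧ c ≠ ']' := by
  constructor <;> rintro rfl <;> exact absurd h (by decide)

-- pvAKeep implies pvBKeep, and pvBKeep is pvAKeep plus the two delimiters (definitional)
lemma pvBKeep_eq (c : Char) : pvBKeep c = (pvAKeep c || c = ',' || c = ']') := rfl

-- flushing the accumulator of A's loop
lemma pvALoop_append (cs : List Char) : ∀ (acc : List (List Char)) (u : List Char),
    pvALoop cs acc u = acc ++ pvALoop cs [] u := by
  induction cs with
  | nil => intro acc u; simp [pvALoop]
  | cons c rest ih =>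
    intro acc u
    by_cases hk : pvAKeep c
    · simp only [pvALoop, hk, if_pos]
      exact ih acc (u ++ [c])
    · by_cases hd : (c = ',' || c = ']') = true
      · simp only [pvALoop, hk, Bool.false_eq_true, if_false, hd, if_pos, List.nil_append]
        rw [ih (acc ++ [u]) [], ih [u] []]
        simp
      · simp only [pvALoop, hk, Bool.false_eq_true, if_false, hd, if_false]
        exact ih acc u

-- A's loop on cs with pending field u is B's pipeline on u ++ cleaned cs, for comma-free u
lemma pv_core (cs : List Char) : ∀ u : List Char, ',' ∉ u →
    pvALoop cs [] u = (pvMM (pvClean cs) u).dropLast := by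
  induction cs with
  | nil => intro u _; simp [pvALoop, pvClean, pvMM]
  | cons c rest ih =>
    intro u hu
    by_cases hk : pvAKeep c
    · obtain ⟨hc1, hc2⟩ := pvAKeep_not_delim hk
      have hb : pvBKeep c = true := by rw [pvBKeep_eq, hk]; simp
      simp only [pvALoop, hk, if_pos]
      rw [ih (u ++ [c]) (by simp [hu]; exact fun h => hc1 h.symm)]
      simp [pvClean, hb, hc2, pvMM, hc1]
    · by_cases hd : (c = ',' || c = ']') = true
      · have hb : pvBKeep c = true := by
          rw [pvBKeep_eq]
          rcases Bool.or_eq_true_iff.mp hd with h | h <;> simp [h]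
        simp only [pvALoop, hk, Bool.false_eq_true, if_false, hd, if_pos]
        rw [pvALoop_append, ih [] (by simp)]
        have hmap : (if c = ']' then ',' else c) = ',' := by
          rcases Bool.or_eq_true_iff.mp hd with h | h
          · simp [of_decide_eq_true h]
          · simp [of_decide_eq_true h]
        simp only [pvClean, List.filter_cons, hb, if_pos, List.map_cons, hmap]
        rw [show pvMM (',' :: ((List.filter pvBKeep rest).map fun c => if c = ']' then ',' else c)) u
              = u :: pvMM (pvClean rest) [] from by simp [pvMM, pvClean]]
        rw [List.dropLast_cons_of_ne_nil (pvMM_ne_nil _ _)]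
        simp [pvClean]
      · have hk' : pvAKeep c = false := by simpa using hk
        have hb : pvBKeep c = false := by
          rw [pvBKeep_eq, hk']
          simpa using hd
        simp only [pvALoop, hk, Bool.false_eq_true, if_false, hd, if_false]
        rw [ih u hu]
        simp [pvClean, hb]

theorem create_email_list_spec : Claim_equal_create_email_list := by
  unfold Claim_equal_create_email_list Spec_create_email_list
  intro emails _
  unfold create_email_list create_email_list_alt
  rw [pv_core emails.toList [] (by simp)]
  rw [show ((emails.toList.filter pvBKeep).map fun c => if c = ']' then ',' else c)
        = pvClean emails.toList from rfl]
  rw [pv_splitOn_eq, pv_slice_neg_one]
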